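-- pv_equiv track=rewrite | github.com/korobopolly/codingchallenges | python.py | solution
-- ===== SOURCE A (Python) =====
-- def solution(numbers):
--     output = [1,2,3,4,5,6,7,8,9,0]
--     for i in range(len(numbers)):
--         if numbers[i] in output:
--             del output[output.index(numbers[i])]
--
--     if len(output) == 0:
--         return 0
--     answer = sum(output)
--     return answer
-- ===== SOURCE B (Python) =====
-- def solution(numbers):
--     return sum(d for d in range(10) if d not in numbers)
-- ===== Notes on version B (the rewrite author's own statement) =====
-- stated objective: simpler
-- what changed: B iterates over the fixed digit universe 0-9 summing the digits absent from the input, instead of A's scan of the input that deletes found digits from a shrinking list and sums the remainder.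
import Mathlib
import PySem

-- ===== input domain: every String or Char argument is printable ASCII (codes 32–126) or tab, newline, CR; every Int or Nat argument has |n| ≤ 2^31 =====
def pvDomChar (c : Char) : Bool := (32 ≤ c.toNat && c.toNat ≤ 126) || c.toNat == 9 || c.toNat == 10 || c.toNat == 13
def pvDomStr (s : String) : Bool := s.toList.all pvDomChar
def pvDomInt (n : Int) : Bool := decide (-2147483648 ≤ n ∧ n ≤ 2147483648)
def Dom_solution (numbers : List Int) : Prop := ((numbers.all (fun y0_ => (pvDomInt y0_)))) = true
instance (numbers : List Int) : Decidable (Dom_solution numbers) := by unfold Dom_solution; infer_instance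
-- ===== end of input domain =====

-- B sums the digits 0-9 that are absent from the input, instead of A's deletion of found digits
-- from a shrinking list; objective: simpler.

-- ===== PORT A =====
-- loop body: 'if numbers[i] in output: del output[output.index(numbers[i])]'
def solutionStep (output : List Int) (x : Int) : List Int :=
  if x ∈ output then
    match PySem.List.index? output x with
    | some k => output.eraseIdx k
    | none => output
  else output

def solution (numbers : List Int) : Int :=
  let output : List Int := [1,2,3,4,5,6,7,8,9,0]
  let output := (PySem.List.pyRange 0 (PySem.List.len numbers) 1).foldl
    (fun output i => solutionStep output (PySem.List.pyGetD numbers i 0))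
    output
  if output.length = 0 then 0 else output.sum

-- ===== PORT B =====
def solution_alt (numbers : List Int) : Int :=
  ((PySem.List.pyRange 0 10 1).filter (fun d => d ∉ numbers)).sum

-- ===== PRECONDITION & SPEC =====
def Spec_solution (numbers : List Int) (out : Int) : Prop := out = solution_alt numbers
instance (numbers : List Int) (out : Int) : Decidable (Spec_solution numbers out) := by unfold Spec_solution; infer_instance

-- ===== CLAIM (what is proved, stated in full; the proofs are below) =====
def Claim_equal_solution : Prop := ∀ (numbers : List Int), Dom_solution numbers → Spec_solution numbers (solution numbers)

-- ===== LEMMAS AND PROOFS =====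

theorem eraseIdx_mid (pre suf : List Int) (x : Int) :
    (pre ++ x :: suf).eraseIdx pre.length = pre ++ suf := by
  induction pre with
  | nil => rfl
  | cons a t ih => simp [ih]

-- One step of A's loop on a duplicate-free state is 'filter out x'.
theorem solution_step (out : List Int) (x : Int) (h : out.Nodup) :
    solutionStep out x = out.filter (fun v => v ≠ x) := by
  unfold solutionStep
  by_cases hx : x ∈ out
  · obtain ⟨k, hk⟩ := Option.isSome_iff_exists.mp ((PySem.List.index?_isSome_iff out x).mpr hx)
    obtain ⟨pre, suf, heq, hlen, hpre⟩ := (PySem.List.index?_eq_some_iff out x k).mp hk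
    subst heq
    have hsuf : x ∉ suf := by
      have := h
      simp only [List.nodup_append, List.nodup_cons] at this
      exact this.2.1.1
    simp only [hx, if_pos, hk, ← hlen, eraseIdx_mid]
    rw [List.filter_append]
    have h1 : pre.filter (fun v => decide (v ≠ x)) = pre := by
      rw [List.filter_eq_self]
      intro a ha
      simp only [ne_eq, decide_eq_true_eq]
      exact fun he => hpre (he ▸ ha)
    have h2 : (x :: suf).filter (fun v => decide (v ≠ x)) = suf := by
      rw [List.filter_cons_of_neg (by simp)]
      rw [List.filter_eq_self]
      intro a ha
      simp only [ne_eq, decide_eq_true_eq]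
      exact fun he => hsuf (he ▸ ha)
    rw [h1, h2]
  · simp only [hx, if_neg, not_false_iff]
    rw [List.filter_eq_self.mpr]
    intro a ha
    simp only [ne_eq, decide_eq_true_eq]
    exact fun he => hx (he ▸ ha)

theorem solution_loop (numbers : List Int) :
    ∀ (out : List Int), out.Nodup →
    numbers.foldl solutionStep
      out = out.filter (fun v => v ∉ numbers) := by
  induction numbers with
  | nil => intro out _; simp
  | cons x rest ih =>
    intro out h
    rw [List.foldl_cons, solution_step out x h,
        ih _ (List.Nodup.filter _ h), List.filter_filter]
    apply List.filter_congr
    intro a _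
    simp only [List.mem_cons, decide_not]
    by_cases h1 : a = x <;> by_cases h2 : a ∈ rest <;> simp [h1, h2]

theorem base_perm : ([1,2,3,4,5,6,7,8,9,0] : List Int).Perm (PySem.List.pyRange 0 10 1) := by
  decide

-- ===== VERDICT (by name: the statement is the Claim_ definition above) =====
theorem solution_spec : Claim_equal_solution := by
  intro numbers _
  show solution numbers = solution_alt numbers
  unfold solution solution_alt
  dsimp only
  rw [PySem.List.foldl_pyRange_zero_pyGetD numbers (0 : Int) solutionStep ([1,2,3,4,5,6,7,8,9,0] : List Int),
      solution_loop numbers [1,2,3,4,5,6,7,8,9,0] (by decide)]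
  have hperm := (List.Perm.filter (fun v => decide (v ∉ numbers)) base_perm).sum_eq
  by_cases h : (([1,2,3,4,5,6,7,8,9,0] : List Int).filter (fun v => v ∉ numbers)).length = 0
  · simp only [h, if_pos]
    rw [← hperm, List.length_eq_zero_iff.mp h]
    rfl
  · simp only [h, if_neg, not_false_iff]
    exact hperm
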